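-- pv_equiv track=rewrite | github.com/chorockuin/algorithm | 00152.py | split_nums
-- ===== SOURCE A (Python) =====
-- def split_nums(nums):
--     s_nums = []
--     s = []
--     for n in nums:
--         if n != 0:
--             s.append(n)
--         else:
--             s_nums.append(s)
--             s = []
--     s_nums.append(s)
--     return s_nums
-- ===== SOURCE B (Python) =====
-- def split_nums(nums):
--     nums = list(nums)
--     try:
--         i = nums.index(0)
--     except ValueError:
--         return [nums]
--     return [nums[:i]] + split_nums(nums[i + 1:])
-- ===== Notes on version B (the rewrite author's own statement) =====
-- stated objective: alternative
-- what changed: Replaces the accumulate-and-flush single pass with a recursive divide: find the first zero with list.index and recurse on the remainder after it, slicing out each segment.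
import Mathlib
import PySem

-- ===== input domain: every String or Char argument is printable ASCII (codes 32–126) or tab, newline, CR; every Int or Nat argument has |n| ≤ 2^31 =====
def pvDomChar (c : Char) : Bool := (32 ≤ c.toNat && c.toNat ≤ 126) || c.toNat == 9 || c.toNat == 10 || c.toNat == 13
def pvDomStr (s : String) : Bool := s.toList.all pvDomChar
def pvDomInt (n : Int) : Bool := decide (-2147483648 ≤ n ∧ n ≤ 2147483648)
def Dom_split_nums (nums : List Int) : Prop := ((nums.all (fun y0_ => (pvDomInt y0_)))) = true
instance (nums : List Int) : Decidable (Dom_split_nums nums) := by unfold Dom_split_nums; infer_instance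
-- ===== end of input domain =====

-- ===== PORT A =====
-- step of A's for-loop: state is (s_nums, s); append at the end like Python list.append
def splitStep (st : List (List Int) × List Int) (n : Int) : List (List Int) × List Int :=
  if n ≠ 0 then (st.1, st.2 ++ [n]) else (st.1 ++ [st.2], [])

def split_nums (nums : List Int) : List (List Int) :=
  let st := nums.foldl splitStep ([], [])
  st.1 ++ [st.2]

-- ===== PORT B =====
-- B: find the first zero (list.index), slice around it, recurse on the tail after it
def split_nums_alt (nums : List Int) : List (List Int) :=
  match h : PySem.List.index? nums 0 with
  | none => [nums]
  | some i =>
      PySem.List.slice nums none (some (i : Int)) ::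
        split_nums_alt (PySem.List.slice nums (some ((i : Int) + 1)) none)
  termination_by nums.length
  decreasing_by
    obtain ⟨hk, -, -⟩ := PySem.List.getElem_of_index?_eq_some h
    have hcast : ((i : Int) + 1) = ((i + 1 : Nat) : Int) := by push_cast; ring
    rw [hcast, PySem.List.slice_from_natCast]
    simp
    omega

-- ===== PRECONDITION & SPEC =====
def Spec_split_nums (nums : List Int) (out : List (List Int)) : Prop := out = split_nums_alt nums
instance (nums : List Int) (out : List (List Int)) : Decidable (Spec_split_nums nums out) := by unfold Spec_split_nums; infer_instance

-- ===== CLAIM (what is proved, stated in full; the proofs are below) =====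
def Claim_equal_split_nums : Prop := ∀ (nums : List Int), Dom_split_nums nums → Spec_split_nums nums (split_nums nums)

-- ===== LEMMAS AND PROOFS =====

-- ===== VERDICT (by name: the statement is the Claim_ definition above) =====
lemma foldA_acc (l : List Int) (acc : List (List Int)) (s : List Int) :
    l.foldl splitStep (acc, s) =
      (acc ++ (l.foldl splitStep ([], s)).1, (l.foldl splitStep ([], s)).2) := by
  induction l generalizing acc s with
  | nil => simp
  | cons n t ih =>
      by_cases hn : n = 0
      · subst hn
        simp only [List.foldl_cons, splitStep, if_neg (by simp : ¬((0:Int) ≠ 0)),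
          List.nil_append]
        rw [ih (acc ++ [s]) [], ih [s] []]
        simp
      · simp [List.foldl_cons, splitStep, hn]
        exact ih acc (s ++ [n])

lemma foldA_nozero (l : List Int) (acc : List (List Int)) (s : List Int)
    (h : (0 : Int) ∉ l) : l.foldl splitStep (acc, s) = (acc, s ++ l) := by
  induction l generalizing s with
  | nil => simp
  | cons n t ih =>
      simp only [List.mem_cons, not_or] at h
      simp only [List.foldl_cons, splitStep, if_pos (Ne.symm h.1)]
      rw [ih _ h.2]
      simp

lemma split_eq (nums : List Int) : split_nums nums = split_nums_alt nums := by
  induction hL : nums.length using Nat.strong_induction_on generalizing nums with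
  | _ L ih =>
  subst hL
  rw [split_nums_alt]
  split
  next h =>
      rw [PySem.List.index?_eq_none_iff] at h
      simp [split_nums, foldA_nozero nums [] [] h]
  next i h =>
      rw [PySem.List.index?_eq_some_iff] at h
      obtain ⟨pre, suf, hs, hlen, hmem⟩ := h
      subst hs
      have hslice1 : PySem.List.slice (pre ++ 0 :: suf) none (some (i : Int)) = pre := by
        rw [PySem.List.slice_to_natCast, ← hlen]
        simp
      have hslice2 : PySem.List.slice (pre ++ 0 :: suf) (some ((i : Int) + 1)) none = suf := by
        have : ((i : Int) + 1) = ((i + 1 : Nat) : Int) := by push_cast; ring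
        rw [this, PySem.List.slice_from_natCast, ← hlen]
        simp
      rw [hslice1, hslice2]
      rw [← ih suf.length (by subst hlen; simp; omega) suf rfl]
      simp only [split_nums, List.foldl_append, List.foldl_cons]
      rw [foldA_nozero pre [] [] hmem]
      simp [splitStep]
      rw [foldA_acc]
      simp

-- ===== VERDICT (by name: the statement is the Claim_ definition above) =====
theorem split_nums_spec : Claim_equal_split_nums := by
  intro nums _
  unfold Spec_split_nums
  exact split_eq nums
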